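-- pv_equiv track=rewrite | github.com/June2124/streaming_analyze_video_audio | src/workers/worker_b_vlm.py | _build_history_context_text
-- ===== SOURCE A (Python) =====
-- from typing import List, Dict, Any, Optional, Iterator, Tuple, Callable
--
-- def _build_history_context_text(history: List[str], max_chars: int) -> str:
--     if not history:
--         return ""
--     buf = []
--     remain = max_chars
--     for one in reversed(history):
--         if not one:
--             continue
--         t = one.strip()
--         if not t:
--             continue
--         if len(t) + 1 > remain:
--             break
--         buf.append(t)
--         remain -= (len(t) + 1)
--     if not buf:
--         return ""
--     return "以下为“历史小结”（近到远，最多 N 段）：\n" + ("\n---\n".join(buf))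
-- ===== SOURCE B (Python) =====
-- def _build_history_context_text(history, max_chars):
--     # filtering pass: stripped, non-empty entries, most recent first
--     texts = [t for t in (s.strip() for s in reversed(history)) if t]
--     # prefix sums of costs len(t)+1
--     sums = []
--     total = 0
--     for t in texts:
--         total += len(t) + 1
--         sums.append(total)
--     # longest prefix whose running total stays within max_chars
--     k = 0
--     while k < len(sums) and sums[k] <= max_chars:
--         k += 1
--     if k == 0:
--         return ""
--     return "以下为“历史小结”（近到远，最多 N 段）：\n" + "\n---\n".join(texts[:k])
-- ===== Notes on version B (the rewrite author's own statement) =====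
-- stated objective: alternative
-- what changed: Replaces A's single reversed loop that strips, skips blanks, and accumulates with an inline budget-and-break by three separate passes: a filter building the stripped non-empty entries newest-first, a prefix-sum pass over costs len(t)+1, and a prefix-length selection (count of prefix sums <= max_chars) that picks texts[:k].
import Mathlib
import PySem

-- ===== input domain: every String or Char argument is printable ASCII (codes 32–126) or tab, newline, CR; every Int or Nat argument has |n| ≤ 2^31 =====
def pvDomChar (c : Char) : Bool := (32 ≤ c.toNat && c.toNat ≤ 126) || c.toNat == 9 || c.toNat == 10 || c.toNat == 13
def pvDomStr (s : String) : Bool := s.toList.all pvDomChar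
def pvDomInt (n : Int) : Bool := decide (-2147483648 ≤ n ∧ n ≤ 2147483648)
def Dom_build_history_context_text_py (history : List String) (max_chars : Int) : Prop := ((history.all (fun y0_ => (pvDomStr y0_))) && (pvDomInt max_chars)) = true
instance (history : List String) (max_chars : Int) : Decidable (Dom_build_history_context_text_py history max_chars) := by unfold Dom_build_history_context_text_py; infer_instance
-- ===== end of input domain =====

-- B replaces A's single accumulate-and-break loop by a filtering pass, a prefix-sum pass and a
-- prefix-length selection (objective: alternative decomposition, same cost).

-- ===== PORT A =====
-- A's for-loop with continue/break, as structural recursion over (buf, remain).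
def pvALoop : List String → List String → Int → List String
  | [], buf, _ => buf
  | one :: rest, buf, remain =>
    if one = "" then pvALoop rest buf remain
    else
      let t := PySem.Str.strip one
      if t = "" then pvALoop rest buf remain
      else if (PySem.Str.len t : Int) + 1 > remain then buf
      else pvALoop rest (buf ++ [t]) (remain - ((PySem.Str.len t : Int) + 1))

def build_history_context_text_py (history : List String) (max_chars : Int) : String :=
  if history = [] then ""
  else
    let buf := pvALoop history.reverse [] max_chars
    if buf = [] then ""
    else PySem.Str.join "" ["以下为“历史小结”（近到远，最多 N 段）：\n", PySem.Str.join "\n---\n" buf]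

-- ===== PORT B =====
-- filtering pass
def pvTexts (history : List String) : List String :=
  (history.reverse.map PySem.Str.strip).filter (fun t => t ≠ "")
-- prefix sums of costs len(t)+1
def pvSums : List String → Int → List Int
  | [], _ => []
  | t :: ts, total =>
    let total' := total + ((PySem.Str.len t : Int) + 1)
    total' :: pvSums ts total'
-- longest prefix whose running total stays within max_chars
def pvCount : List Int → Int → Nat
  | [], _ => 0
  | s :: ss, m => if s ≤ m then pvCount ss m + 1 else 0

def build_history_context_text_py_alt (history : List String) (max_chars : Int) : String :=
  let texts := pvTexts history
  let k := pvCount (pvSums texts 0) max_chars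
  if k = 0 then ""
  else PySem.Str.join "" ["以下为“历史小结”（近到远，最多 N 段）：\n", PySem.Str.join "\n---\n" (texts.take k)]

-- ===== PRECONDITION & SPEC =====
def Spec_build_history_context_text_py (history : List String) (max_chars : Int) (out : String) : Prop := out = build_history_context_text_py_alt history max_chars
instance (history : List String) (max_chars : Int) (out : String) : Decidable (Spec_build_history_context_text_py history max_chars out) := by unfold Spec_build_history_context_text_py; infer_instance

-- ===== CLAIM (what is proved, stated in full; the proofs are below) =====
def Claim_equal_build_history_context_text_py : Prop := ∀ (history : List String) (max_chars : Int), Dom_build_history_context_text_py history max_chars → Spec_build_history_context_text_py history max_chars (build_history_context_text_py history max_chars)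

-- ===== LEMMAS AND PROOFS =====

-- A's loop equals buf ++ the greedy prefix of the filtered list selected by pvCount on prefix sums.
theorem pvALoop_eq (xs : List String) : ∀ (buf : List String) (remain : Int),
    pvALoop xs buf remain =
      buf ++ (let ts := (xs.map PySem.Str.strip).filter (fun t => t ≠ "")
              ts.take (pvCount (pvSums ts 0) remain)) := by
  suffices h : ∀ (xs : List String) (buf : List String) (m acc : Int),
      pvALoop xs buf (m - acc) =
        buf ++ (let ts := (xs.map PySem.Str.strip).filter (fun t => t ≠ "")
                ts.take (pvCount (pvSums ts acc) m)) by
    intro buf remain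
    simpa using h xs buf remain 0
  intro xs
  induction xs with
  | nil => intro buf m acc; simp [pvALoop, pvSums, pvCount]
  | cons one rest ih =>
    intro buf m acc
    by_cases h2 : PySem.Str.strip one = ""
    · by_cases h1 : one = ""
      · subst h1
        simpa [pvALoop] using ih buf m acc
      · simp only [pvALoop, if_neg h1, h2, List.map_cons]
        rw [List.filter_cons_of_neg (by simp)]
        exact ih buf m acc
    · have h1 : one ≠ "" := by
        intro h; apply h2; rw [h]; decide
      simp only [pvALoop, if_neg h1, if_neg h2, List.map_cons]
      rw [List.filter_cons_of_pos (by simp [h2])]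
      have hlen : (PySem.Str.len (PySem.Str.strip one) : Int)
          = (((PySem.Chars.strip one.toList).length : Nat) : Int) := by
        simp [PySem.Str.len_eq]
      split_ifs with h3
      · have hc : ¬ (acc + ((((PySem.Chars.strip one.toList).length : Nat) : Int) + 1) ≤ m) := by omega
        simp [pvSums, pvCount, hc]
      · have hc : acc + ((((PySem.Chars.strip one.toList).length : Nat) : Int) + 1) ≤ m := by omega
        have harg : m - acc - ((PySem.Str.len (PySem.Str.strip one) : Int) + 1)
            = m - (acc + ((PySem.Str.len (PySem.Str.strip one) : Int) + 1)) := by ring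
        rw [harg, ih (buf ++ [PySem.Str.strip one]) m _]
        simp [pvSums, pvCount, hc, List.take_succ_cons]

-- ===== VERDICT (by name: the statement is the Claim_ definition above) =====
theorem build_history_context_text_py_spec : Claim_equal_build_history_context_text_py := by
  intro history max_chars _
  unfold Spec_build_history_context_text_py build_history_context_text_py build_history_context_text_py_alt
  by_cases hh : history = []
  · subst hh
    simp [pvTexts, pvSums, pvCount]
  · simp only [if_neg hh]
    have hloop := pvALoop_eq history.reverse [] max_chars
    simp only [List.nil_append] at hloop
    rw [hloop]
    have hts : pvTexts history = (history.reverse.map PySem.Str.strip).filter (fun t => t ≠ "") := rfl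
    rw [← hts]
    cases hk : pvCount (pvSums (pvTexts history) 0) max_chars with
    | zero => simp
    | succ n =>
      have hne : pvTexts history ≠ [] := by
        intro h0
        rw [h0] at hk
        simp [pvSums, pvCount] at hk
      have htk : (pvTexts history).take (n + 1) ≠ [] := by
        simp [List.take_eq_nil_iff, hne]
      simp [htk]
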